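-- pv_equiv track=rewrite | github.com/treforyan-hue/comfyui-deploy | extras/ComfyUI-Batch-Process/nodes/text_modify_tool.py | find_separator
-- ===== SOURCE A (Python) =====
-- def find_separator(text, find_last=False):
--     """查找第一个或最后一个分隔符位置"""
--     sep_chars = ["-", "_", "——", "#"]
--     target_pos = -1
--     found_sep = ""
--     for sep in sep_chars:
--         pos = text.rfind(sep) if find_last else text.find(sep)
--         if pos == -1:
--             continue
--         if (find_last and pos > target_pos) or (
--             not find_last and (target_pos == -1 or pos < target_pos)
--         ):
--             target_pos = pos
--             found_sep = sep
--     return target_pos, found_sep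
-- ===== SOURCE B (Python) =====
-- def find_separator(text, find_last=False):
--     """Single positional scan: first (or last) index where any separator starts."""
--     seps = ["-", "_", "\u2014\u2014", "#"]
--     n = len(text)
--     indices = reversed(range(n)) if find_last else range(n)
--     for i in indices:
--         for sep in seps:
--             if text.startswith(sep, i):
--                 return i, sep
--     return -1, ""
-- ===== Notes on version B (the rewrite author's own statement) =====
-- stated objective: alternative
-- what changed: Instead of four independent str.find/rfind scans combined by min/max tie-breaking, B makes one positional pass (left-to-right for first, right-to-left for last) and returns at the first index where any separator starts; since the separators have distinct first characters the tie-breaking of A never triggers and the results coincide.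
import Mathlib
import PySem

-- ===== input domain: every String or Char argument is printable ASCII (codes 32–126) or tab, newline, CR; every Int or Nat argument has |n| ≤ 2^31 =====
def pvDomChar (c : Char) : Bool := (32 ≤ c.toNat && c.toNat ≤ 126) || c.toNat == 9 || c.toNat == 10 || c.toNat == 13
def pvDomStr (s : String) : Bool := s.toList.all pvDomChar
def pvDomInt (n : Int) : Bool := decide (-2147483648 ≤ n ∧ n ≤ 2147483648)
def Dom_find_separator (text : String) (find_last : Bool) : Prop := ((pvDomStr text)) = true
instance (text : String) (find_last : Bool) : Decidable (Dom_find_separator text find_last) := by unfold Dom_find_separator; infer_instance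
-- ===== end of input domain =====

-- B replaces A's four whole-string find/rfind scans combined by min/max tie-breaking with one
-- positional scan that stops at the first (scanning right-to-left for find_last: last) index
-- where any separator starts (objective: alternative).

-- ===== PORT A =====
def find_separator (text : String) (find_last : Bool) : Int × String :=
  let sep_chars : List String := ["-", "_", "——", "#"]
  sep_chars.foldl (fun acc sep =>
    let pos : Int := if find_last then PySem.Str.rfind text sep else PySem.Str.find text sep
    if pos = -1 then acc
    else if (find_last && decide (acc.1 < pos)) ||
            (!find_last && (decide (acc.1 = -1) || decide (pos < acc.1))) then
      (pos, sep)
    else acc) ((-1 : Int), "")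

-- ===== PORT B =====
-- the inner 'for sep in seps: if text.startswith(sep, i): return i, sep' = first matching sep;
-- text.startswith(sep, i) with 0 ≤ i ≤ len(text) is exactly startswith(text[i:], sep) (exact on that range)
def pvSepHit (L : List Char) (seps : List (List Char)) (i : Nat) : Option (List Char) :=
  seps.find? (fun sep => PySem.Chars.startswith (L.drop i) sep)

-- the outer 'for i in indices: … return i, sep' loop with its early exit
def pvScan (L : List Char) (seps : List (List Char)) : List Nat → Int × String
  | [] => (-1, "")
  | i :: rest =>
    match pvSepHit L seps i with
    | some sep => ((i : Int), String.ofList sep)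
    | none => pvScan L seps rest

def find_separator_alt (text : String) (find_last : Bool) : Int × String :=
  let seps : List (List Char) := [['-'], ['_'], ['—', '—'], ['#']]
  let L := text.toList
  let n := L.length
  let indices := if find_last then (List.range n).reverse else List.range n
  pvScan L seps indices

-- ===== PRECONDITION & SPEC =====
def Spec_find_separator (text : String) (find_last : Bool) (out : Int × String) : Prop := out = find_separator_alt text find_last
instance (text : String) (find_last : Bool) (out : Int × String) : Decidable (Spec_find_separator text find_last out) := by unfold Spec_find_separator; infer_instance

-- ===== CLAIM (what is proved, stated in full; the proofs are below) =====
def Claim_equal_find_separator : Prop := ∀ (text : String) (find_last : Bool), Dom_find_separator text find_last → Spec_find_separator text find_last (find_separator text find_last)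

-- ===== LEMMAS AND PROOFS =====

-- the separator lists of the two ports, named for the proofs
def pvSl4 : List String := ["-", "_", "——", "#"]
def pvSl4B : List (List Char) := [['-'], ['_'], ['—', '—'], ['#']]

theorem pv_corr : ∀ x ∈ pvSl4B, ∃ S ∈ pvSl4, S.toList = x := by decide
theorem pv_ne_nil' : ∀ S ∈ pvSl4, S.toList ≠ [] := by decide
theorem pv_ofList : ∀ S ∈ pvSl4, String.ofList S.toList = S := by decide

-- two nonempty prefixes of the same list share their first character
theorem pv_prefix_head {a b : Char} {t1 t2 l : List Char}
    (h1 : (a :: t1) <+: l) (h2 : (b :: t2) <+: l) : a = b := by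
  obtain ⟨r1, e1⟩ := h1
  obtain ⟨r2, e2⟩ := h2
  have := e1.trans e2.symm
  simpa using congrArg List.head? this

-- the four separators have pairwise distinct first characters, so at most one matches at a position
theorem pv_match_unique {l : List Char} : ∀ x1 ∈ pvSl4B, ∀ x2 ∈ pvSl4B,
    x1 <+: l → x2 <+: l → x1 = x2 := by
  intro x1 h1 x2 h2 hp1 hp2
  fin_cases h1 <;> fin_cases h2 <;>
    first
    | rfl
    | exact absurd (pv_prefix_head hp1 hp2) (by decide)

-- find? returns a when a matches and every matching element equals a
theorem pv_find?_unique {α : Type} {p : α → Bool} {l : List α} {a : α}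
    (ha : a ∈ l) (hpa : p a = true) (huniq : ∀ x ∈ l, p x = true → x = a) :
    l.find? p = some a := by
  induction l with
  | nil => cases ha
  | cons b t ih =>
    by_cases hb : p b = true
    · rw [List.find?_cons_of_pos hb, huniq b (by simp) hb]
    · rcases List.mem_cons.mp ha with rfl | hat
      · exact absurd hpa hb
      · rw [List.find?_cons_of_neg hb]
        exact ih hat (fun x hx => huniq x (by simp [hx]))

-- find = -1 or the least start index of an occurrence
theorem pv_find_cases (s sub : List Char) :
    (PySem.Chars.find s sub = -1 ∧ ∀ i, ¬ sub <+: s.drop i) ∨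
    (∃ k : Nat, PySem.Chars.find s sub = (k : Int) ∧ sub <+: s.drop k ∧
      ∀ i, i < k → ¬ sub <+: s.drop i) := by
  rcases (by omega : 0 ≤ PySem.Chars.find s sub ∨ PySem.Chars.find s sub < 0) with h0 | h0
  · obtain ⟨hpre, hmin⟩ := PySem.Chars.find_spec h0
    exact Or.inr ⟨(PySem.Chars.find s sub).toNat, (Int.toNat_of_nonneg h0).symm, hpre, hmin⟩
  · have h1 : PySem.Chars.find s sub = -1 := by
      have := PySem.Chars.neg_one_le_find s sub; omega
    refine Or.inl ⟨h1, fun i hi => ?_⟩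
    have hinf : sub <:+: s := (PySem.Chars.isIn_iff_infix ..).mp
      ((PySem.Chars.exists_prefix_drop_iff_isIn ..).mp ⟨i, hi⟩)
    exact (PySem.Chars.find_eq_neg_one_iff ..).mp h1 hinf

-- rfind.go finds the greatest start index ≤ j, or -1
theorem pv_rfind_go_cases (s sub : List Char) (j : Nat) :
    (PySem.Chars.rfind.go s sub j = -1 ∧ ∀ i ≤ j, ¬ sub <+: s.drop i) ∨
    (∃ k : Nat, PySem.Chars.rfind.go s sub j = (k : Int) ∧ k ≤ j ∧ sub <+: s.drop k ∧
      ∀ i, k < i → i ≤ j → ¬ sub <+: s.drop i) := by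
  induction j with
  | zero =>
    rw [PySem.Chars.rfind.go.eq_1]
    by_cases h : sub.isPrefixOf s
    · exact Or.inr ⟨0, by simp [h], le_refl 0,
        by simpa using (List.isPrefixOf_iff_prefix).mp h, fun i h1 h2 => by omega⟩
    · refine Or.inl ⟨by simp [h], fun i hi hp => ?_⟩
      have : i = 0 := by omega
      subst this
      exact h ((List.isPrefixOf_iff_prefix).mpr (by simpa using hp))
  | succ j ih =>
    rw [PySem.Chars.rfind.go.eq_2]
    by_cases h : sub.isPrefixOf (s.drop (j + 1))
    · exact Or.inr ⟨j + 1, by simp [h], le_refl _,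
        (List.isPrefixOf_iff_prefix).mp h, fun i h1 h2 => by omega⟩
    · simp only [h, if_false, Bool.false_eq_true]
      rcases ih with ⟨he, hall⟩ | ⟨k, he, hk, hp, hmax⟩
      · refine Or.inl ⟨he, fun i hi hp => ?_⟩
        rcases Nat.lt_or_ge i (j + 1) with hlt | hge
        · exact hall i (by omega) hp
        · have : i = j + 1 := by omega
          subst this
          exact h ((List.isPrefixOf_iff_prefix).mpr hp)
      · refine Or.inr ⟨k, he, by omega, hp, fun i h1 h2 => ?_⟩
        rcases Nat.lt_or_ge i (j + 1) with hlt | hge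
        · exact hmax i h1 (by omega)
        · intro hpre
          have : i = j + 1 := by omega
          subst this
          exact h ((List.isPrefixOf_iff_prefix).mpr hpre)

-- rfind of a nonempty pattern: -1 or the greatest start index
theorem pv_rfind_cases (s sub : List Char) (hne : sub ≠ []) :
    (PySem.Chars.rfind s sub = -1 ∧ ∀ i, ¬ sub <+: s.drop i) ∨
    (∃ k : Nat, PySem.Chars.rfind s sub = (k : Int) ∧ sub <+: s.drop k ∧
      ∀ i, k < i → ¬ sub <+: s.drop i) := by
  have hout : ∀ i, s.length < i → ¬ sub <+: s.drop i := by
    intro i hi hp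
    rw [List.drop_eq_nil_of_le (by omega)] at hp
    exact hne (List.prefix_nil.mp hp)
  rcases pv_rfind_go_cases s sub s.length with ⟨he, hall⟩ | ⟨k, he, hk, hp, hmax⟩
  · refine Or.inl ⟨he, fun i hp => ?_⟩
    rcases (by omega : i ≤ s.length ∨ s.length < i) with hle | hlt
    · exact hall i hle hp
    · exact hout i hlt hp
  · refine Or.inr ⟨k, he, hp, fun i h1 hp => ?_⟩
    rcases (by omega : i ≤ s.length ∨ s.length < i) with hle | hlt
    · exact hmax i h1 hle hp
    · exact hout i hlt hp

-- pvScan skips indices with no hit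
theorem pv_scan_no_hit (L : List Char) (seps : List (List Char)) (pre rest : List Nat)
    (h : ∀ j ∈ pre, pvSepHit L seps j = none) :
    pvScan L seps (pre ++ rest) = pvScan L seps rest := by
  induction pre with
  | nil => rfl
  | cons a t ih =>
    have ha : pvSepHit L seps a = none := h a (by simp)
    simp only [List.cons_append, pvScan, ha]
    exact ih (fun j hj => h j (by simp [hj]))

theorem pv_scan_all_none (L : List Char) (seps : List (List Char)) (idxs : List Nat)
    (h : ∀ j ∈ idxs, pvSepHit L seps j = none) :
    pvScan L seps idxs = (-1, "") := by
  simpa using pv_scan_no_hit L seps idxs [] h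

-- abbreviations for the occurrence positions A computes
def pvF (L : List Char) (sep : String) : Int := PySem.Chars.find L sep.toList
def pvR (L : List Char) (sep : String) : Int := PySem.Chars.rfind L sep.toList

-- A's fold step with find_last = False / True, written out
def pvStepF (L : List Char) (acc : Int × String) (sep : String) : Int × String :=
  let pos : Int := PySem.Chars.find L sep.toList
  if pos = -1 then acc
  else if decide (acc.1 = -1) || decide (pos < acc.1) then (pos, sep) else acc

def pvStepR (L : List Char) (acc : Int × String) (sep : String) : Int × String :=
  let pos : Int := PySem.Chars.rfind L sep.toList
  if pos = -1 then acc
  else if decide (acc.1 < pos) then (pos, sep) else acc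

theorem pvA_false (text : String) :
    find_separator text false = List.foldl (pvStepF text.toList) (-1, "") pvSl4 := by
  simp only [find_separator, pvSl4, Bool.false_and, Bool.not_false, Bool.true_and,
    Bool.false_or, if_false, PySem.Str.find_eq, Bool.false_eq_true]
  rfl

theorem pvA_true (text : String) :
    find_separator text true = List.foldl (pvStepR text.toList) (-1, "") pvSl4 := by
  simp only [find_separator, pvSl4, Bool.true_and, Bool.not_true, Bool.false_and,
    Bool.or_false, if_true, PySem.Str.rfind_eq]
  rfl

theorem pvAlt_false (text : String) :
    find_separator_alt text false = pvScan text.toList pvSl4B (List.range text.toList.length) := rfl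

theorem pvAlt_true (text : String) :
    find_separator_alt text true = pvScan text.toList pvSl4B (List.range text.toList.length).reverse := rfl

-- invariant of A's fold, find_last = False: accumulator (-1,"") or the first separator at the least position
theorem pv_foldF (L : List Char) (seps : List String) : ∀ acc : Int × String,
    (List.foldl (pvStepF L) acc seps = acc ∧
      ∀ sep ∈ seps, pvF L sep = -1 ∨ (acc.1 ≠ -1 ∧ acc.1 ≤ pvF L sep)) ∨
    (∃ sep ∈ seps, List.foldl (pvStepF L) acc seps = (pvF L sep, sep) ∧ 0 ≤ pvF L sep ∧
      (acc.1 = -1 ∨ pvF L sep < acc.1) ∧ ∀ s' ∈ seps, pvF L s' = -1 ∨ pvF L sep ≤ pvF L s') := by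
  induction seps with
  | nil => intro acc; exact Or.inl ⟨rfl, by simp⟩
  | cons s t ih =>
    intro acc
    by_cases h1 : pvF L s = -1
    · have hstep : pvStepF L acc s = acc := by simp [pvStepF, pvF] at h1 ⊢; simp [h1]
      rw [List.foldl_cons, hstep]
      rcases ih acc with ⟨he, hall⟩ | ⟨sep, hm, he, h0, hacc, hmin⟩
      · exact Or.inl ⟨he, by
          intro x hx
          rcases List.mem_cons.mp hx with rfl | hx
          · exact Or.inl h1
          · exact hall x hx⟩
      · refine Or.inr ⟨sep, List.mem_cons_of_mem _ hm, he, h0, hacc, ?_⟩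
        intro x hx
        rcases List.mem_cons.mp hx with rfl | hx
        · exact Or.inl h1
        · exact hmin x hx
    · have h0 : 0 ≤ pvF L s := by
        have : -1 ≤ pvF L s := PySem.Chars.neg_one_le_find L s.toList
        omega
      by_cases h2 : acc.1 = -1 ∨ pvF L s < acc.1
      · have hstep : pvStepF L acc s = (pvF L s, s) := by
          simp only [pvStepF, pvF] at *
          rw [if_neg h1, if_pos (by simpa using h2)]
        rw [List.foldl_cons, hstep]
        rcases ih (pvF L s, s) with ⟨he, hall⟩ | ⟨sep, hm, he, h0', hacc, hmin⟩
        · refine Or.inr ⟨s, List.mem_cons_self .., he, h0, h2, ?_⟩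
          intro x hx
          rcases List.mem_cons.mp hx with rfl | hx
          · exact Or.inr le_rfl
          · rcases hall x hx with hx1 | hx2
            · exact Or.inl hx1
            · exact Or.inr hx2.2
        · have hlt : pvF L sep < pvF L s := by
            rcases hacc with hc | hc
            · exact absurd hc (by omega)
            · exact hc
          refine Or.inr ⟨sep, List.mem_cons_of_mem _ hm, he, h0', ?_, ?_⟩
          · rcases h2 with hc | hc
            · exact Or.inl hc
            · exact Or.inr (by omega)
          · intro x hx
            rcases List.mem_cons.mp hx with rfl | hx
            · exact Or.inr (le_of_lt hlt)
            · exact hmin x hx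
      · have hstep : pvStepF L acc s = acc := by
          simp only [pvStepF, pvF] at *
          rw [if_neg h1, if_neg (by simpa using h2)]
        rw [List.foldl_cons, hstep]
        push Not at h2
        rcases ih acc with ⟨he, hall⟩ | ⟨sep, hm, he, h0', hacc, hmin⟩
        · refine Or.inl ⟨he, ?_⟩
          intro x hx
          rcases List.mem_cons.mp hx with rfl | hx
          · exact Or.inr ⟨h2.1, h2.2⟩
          · exact hall x hx
        · refine Or.inr ⟨sep, List.mem_cons_of_mem _ hm, he, h0', hacc, ?_⟩
          intro x hx
          rcases List.mem_cons.mp hx with rfl | hx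
          · have : pvF L sep < acc.1 := by
              rcases hacc with hc | hc
              · exact absurd hc h2.1
              · exact hc
            exact Or.inr (by have := h2.2; omega)
          · exact hmin x hx

-- invariant of A's fold, find_last = True: accumulator unchanged or the separator at the greatest position
theorem pv_foldR (L : List Char) (seps : List String) : ∀ acc : Int × String, -1 ≤ acc.1 →
    (List.foldl (pvStepR L) acc seps = acc ∧ ∀ sep ∈ seps, pvR L sep ≤ acc.1) ∨
    (∃ sep ∈ seps, List.foldl (pvStepR L) acc seps = (pvR L sep, sep) ∧ acc.1 < pvR L sep ∧
      ∀ s' ∈ seps, pvR L s' ≤ pvR L sep) := by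
  induction seps with
  | nil => intro acc _; exact Or.inl ⟨rfl, by simp⟩
  | cons s t ih =>
    intro acc hacc
    by_cases h2 : acc.1 < pvR L s
    · have h1 : ¬ pvR L s = -1 := by omega
      have hstep : pvStepR L acc s = (pvR L s, s) := by
        simp only [pvStepR, pvR] at *
        rw [if_neg h1, if_pos (by simpa using h2)]
      rw [List.foldl_cons, hstep]
      rcases ih (pvR L s, s) (by simp; omega) with ⟨he, hall⟩ | ⟨sep, hm, he, hlt, hmax⟩
      · refine Or.inr ⟨s, List.mem_cons_self .., he, h2, ?_⟩
        intro x hx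
        rcases List.mem_cons.mp hx with rfl | hx
        · exact le_rfl
        · simpa using hall x hx
      · refine Or.inr ⟨sep, List.mem_cons_of_mem _ hm, he, by simp at hlt; omega, ?_⟩
        intro x hx
        rcases List.mem_cons.mp hx with rfl | hx
        · simp at hlt; omega
        · exact hmax x hx
    · have hstep : pvStepR L acc s = acc := by
        simp only [pvStepR, pvR] at *
        by_cases h1 : PySem.Chars.rfind L s.toList = -1
        · rw [if_pos h1]
        · rw [if_neg h1, if_neg (by simpa using h2)]
      rw [List.foldl_cons, hstep]
      rcases ih acc hacc with ⟨he, hall⟩ | ⟨sep, hm, he, hlt, hmax⟩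
      · refine Or.inl ⟨he, ?_⟩
        intro x hx
        rcases List.mem_cons.mp hx with rfl | hx
        · omega
        · exact hall x hx
      · refine Or.inr ⟨sep, List.mem_cons_of_mem _ hm, he, hlt, ?_⟩
        intro x hx
        rcases List.mem_cons.mp hx with rfl | hx
        · omega
        · exact hmax x hx

-- no separator matching at j: B's inner search at j comes up empty
theorem pv_hit_none (L : List Char) (j : Nat)
    (h : ∀ x ∈ pvSl4B, ¬ x <+: L.drop j) : pvSepHit L pvSl4B j = none := by
  apply List.find?_eq_none.mpr
  intro x hx
  simp only [Bool.not_eq_true]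
  rcases Bool.eq_false_or_eq_true (PySem.Chars.startswith (L.drop j) x) with hb | hb
  · exact absurd ((PySem.Chars.startswith_iff ..).mp hb) (h x hx)
  · exact hb

-- a separator matching at k: B's inner search at k finds exactly it
theorem pv_hit_some (L : List Char) (k : Nat) (x : List Char) (hx : x ∈ pvSl4B)
    (hp : x <+: L.drop k) : pvSepHit L pvSl4B k = some x := by
  apply pv_find?_unique hx ((PySem.Chars.startswith_iff ..).mpr hp)
  intro y hy hb
  exact pv_match_unique y hy x hx ((PySem.Chars.startswith_iff ..).mp hb) hp

theorem pv_range_split' (k m : Nat) :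
    List.range (k + 1 + m) = List.range k ++ k :: List.map (fun x => k + 1 + x) (List.range m) := by
  rw [List.range_add, List.range_succ]
  simp [List.append_assoc]

theorem pv_range_split (k n : Nat) (h : k < n) :
    List.range n = List.range k ++ k :: List.map (fun x => k + 1 + x) (List.range (n - k - 1)) := by
  have := pv_range_split' k (n - k - 1)
  rwa [show k + 1 + (n - k - 1) = n by omega] at this

-- a nonempty separator matching at k forces k < length
theorem pv_lt_length {L : List Char} {k : Nat} {x : List Char} (hne : x ≠ [])
    (hp : x <+: L.drop k) : k < L.length := by
  by_contra hc
  rw [List.drop_eq_nil_of_le (by omega)] at hp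
  exact hne (List.prefix_nil.mp hp)

-- main case find_last = False
theorem pv_main_false (text : String) :
    find_separator text false = find_separator_alt text false := by
  rw [pvA_false, pvAlt_false]
  rcases pv_foldF text.toList pvSl4 (-1, "") with ⟨he, hall⟩ | ⟨sep, hm, he, h0, _, hmin⟩
  · rw [he]
    refine (pv_scan_all_none _ _ _ ?_).symm
    intro j _
    apply pv_hit_none
    intro x hx hp
    obtain ⟨S, hS, hSx⟩ := pv_corr x hx
    have hF : pvF text.toList S = -1 := by
      rcases hall S hS with h | h
      · exact h
      · exact absurd rfl h.1
    rcases pv_find_cases text.toList S.toList with ⟨_, hnone⟩ | ⟨k, hk, _, _⟩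
    · exact hnone j (hSx ▸ hp)
    · rw [pvF, hk] at hF; omega
  · rw [he]
    rcases pv_find_cases text.toList sep.toList with ⟨hm1, _⟩ | ⟨k, hk, hpre, hminp⟩
    · rw [pvF] at h0; omega
    · have hxB : sep.toList ∈ pvSl4B := by
        fin_cases hm <;> decide
      have hklen : k < text.toList.length := pv_lt_length (pv_ne_nil' sep hm) hpre
      rw [pv_range_split k _ hklen,
        pv_scan_no_hit _ _ _ _ ?_]
      · have hhit := pv_hit_some text.toList k sep.toList hxB hpre
        simp only [pvScan, hhit]
        rw [pvF, hk, pv_ofList sep hm]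
      · intro j hj
        have hjk : j < k := List.mem_range.mp hj
        apply pv_hit_none
        intro x hx hp
        obtain ⟨S, hS, hSx⟩ := pv_corr x hx
        rcases pv_find_cases text.toList S.toList with ⟨_, hnone⟩ | ⟨k', hk', _, hmin'⟩
        · exact hnone j (hSx ▸ hp)
        · have hk'j : k' ≤ j := by
            by_contra hc
            exact hmin' j (by omega) (hSx ▸ hp)
          have := hmin S hS
          rw [pvF, pvF, hk, hk'] at this
          rcases this with h | h
          · omega
          · omega

-- main case find_last = True
theorem pv_main_true (text : String) :
    find_separator text true = find_separator_alt text true := by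
  rw [pvA_true, pvAlt_true]
  rcases pv_foldR text.toList pvSl4 (-1, "") (by simp) with ⟨he, hall⟩ | ⟨sep, hm, he, hlt, hmax⟩
  · rw [he]
    refine (pv_scan_all_none _ _ _ ?_).symm
    intro j _
    apply pv_hit_none
    intro x hx hp
    obtain ⟨S, hS, hSx⟩ := pv_corr x hx
    rcases pv_rfind_cases text.toList S.toList (pv_ne_nil' S hS) with ⟨_, hnone⟩ | ⟨k, hk, _, _⟩
    · exact hnone j (hSx ▸ hp)
    · have := hall S hS
      rw [pvR, hk] at this
      simp at this
      omega
  · rw [he]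
    rcases pv_rfind_cases text.toList sep.toList (pv_ne_nil' sep hm) with ⟨hm1, _⟩ | ⟨k, hk, hpre, hmaxp⟩
    · rw [pvR] at hlt; simp at hlt; omega
    · have hxB : sep.toList ∈ pvSl4B := by
        fin_cases hm <;> decide
      have hklen : k < text.toList.length := pv_lt_length (pv_ne_nil' sep hm) hpre
      rw [pv_range_split k _ hklen]
      rw [List.reverse_append, List.reverse_cons, List.append_assoc, List.singleton_append]
      rw [pv_scan_no_hit _ _ _ _ ?_]
      · have hhit := pv_hit_some text.toList k sep.toList hxB hpre
        simp only [pvScan, hhit]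
        rw [pvR, hk, pv_ofList sep hm]
      · intro j hj
        have hjk : k < j := by
          simp only [List.mem_reverse, List.mem_map, List.mem_range] at hj
          obtain ⟨x, _, rfl⟩ := hj
          omega
        apply pv_hit_none
        intro x hx hp
        obtain ⟨S, hS, hSx⟩ := pv_corr x hx
        rcases pv_rfind_cases text.toList S.toList (pv_ne_nil' S hS) with ⟨_, hnone⟩ | ⟨k', hk', _, hmax'⟩
        · exact hnone j (hSx ▸ hp)
        · have hjk' : j ≤ k' := by
            by_contra hc
            exact hmax' j (by omega) (hSx ▸ hp)
          have := hmax S hS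
          rw [pvR, pvR, hk, hk'] at this
          omega

-- ===== VERDICT (by name: the statement is the Claim_ definition above) =====
theorem find_separator_spec : Claim_equal_find_separator := by
  intro text find_last _
  unfold Spec_find_separator
  cases find_last
  · exact pv_main_false text
  · exact pv_main_true text
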